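-- pv_equiv track=rewrite | github.com/yeonnseok/ps-algorithm | programmers/level1/이상한 문자 만들기.py | solution
-- ===== SOURCE A (Python) =====
-- def solution(s):
--     answer = ''
--     idx = 0
--     for ch in s:
--         if idx % 2 == 0:
--             answer += ch.upper()
--         else:
--             answer += ch.lower()
--         idx += 1
--         if ch == ' ':
--             idx = 0
--
--     return answer
-- ===== SOURCE B (Python) =====
-- def solution(s):
--     return ' '.join(
--         ''.join(c.upper() if i % 2 == 0 else c.lower() for i, c in enumerate(w))
--         for w in s.split(' ')
--     )
-- ===== Notes on version B (the rewrite author's own statement) =====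
-- stated objective: idiomatic
-- what changed: Replaces A's single scan with a counter reset mid-scan at each space by the idiomatic decomposition: split on single spaces, rebuild each word by enumerate with parity case, then join the words back.
import Mathlib
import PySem

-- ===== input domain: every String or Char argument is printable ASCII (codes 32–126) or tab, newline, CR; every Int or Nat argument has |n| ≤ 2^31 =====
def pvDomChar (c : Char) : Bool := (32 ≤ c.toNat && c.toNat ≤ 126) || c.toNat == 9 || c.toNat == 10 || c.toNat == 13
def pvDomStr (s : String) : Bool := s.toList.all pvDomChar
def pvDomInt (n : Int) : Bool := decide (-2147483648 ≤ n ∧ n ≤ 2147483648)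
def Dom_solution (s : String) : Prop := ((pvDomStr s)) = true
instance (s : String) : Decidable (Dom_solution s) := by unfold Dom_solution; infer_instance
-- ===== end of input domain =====

-- B replaces A's mid-scan counter-with-reset by split(' ') / per-word enumerate / join (idiomatic decomposition; same cost).

-- ===== PORT A =====
-- literal port: fold over the characters with state (answer, idx); idx resets to 0 after a space
def solution (s : String) : String :=
  let st := s.toList.foldl
    (fun (p : List Char × Int) ch =>
      let answer := p.1 ++ [if PySem.Int.mod p.2 2 == 0
                            then PySem.Chars.upperChar ch else PySem.Chars.lowerChar ch]
      let idx := p.2 + 1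
      (answer, if ch == ' ' then 0 else idx))
    ([], 0)
  String.ofList st.1

-- ===== PORT B =====
-- literal port of Source B: split on ' ', transform each word by enumerate-parity, join with ' '
def solution_alt (s : String) : String :=
  String.ofList (PySem.Chars.join [' ']
    ((PySem.Chars.splitOn s.toList [' ']).map (fun w =>
      (PySem.List.enumerate w).map (fun p =>
        if PySem.Int.mod p.1 2 == 0
        then PySem.Chars.upperChar p.2 else PySem.Chars.lowerChar p.2))))

-- ===== PRECONDITION & SPEC =====
def Spec_solution (s : String) (out : String) : Prop := out = solution_alt s
instance (s : String) (out : String) : Decidable (Spec_solution s out) := by unfold Spec_solution; infer_instance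

-- ===== CLAIM (what is proved, stated in full; the proofs are below) =====
def Claim_equal_solution : Prop := ∀ (s : String), Dom_solution s → Spec_solution s (solution s)

-- ===== LEMMAS AND PROOFS =====

-- per-character transform shared by both proofs
def pvT (i : Int) (c : Char) : Char :=
  if PySem.Int.mod i 2 == 0 then PySem.Chars.upperChar c else PySem.Chars.lowerChar c

-- structural single-space split: (first segment, remaining segments)
def pvWsplit : List Char → List Char × List (List Char)
  | [] => ([], [])
  | c :: cs =>
    let r := pvWsplit cs
    if c = ' ' then ([], r.1 :: r.2) else (c :: r.1, r.2)

-- what A's loop emits from counter state i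
def pvBody (i : Int) : List Char → List Char
  | [] => []
  | c :: cs => pvT i c :: pvBody (if c == ' ' then 0 else i + 1) cs

-- a word transformed with indices starting at i
def pvTrans (w : List Char) (i : Int) : List Char :=
  (PySem.List.enumerate w i).map (fun p => pvT p.1 p.2)

theorem pvFoldl_eq_body (cs : List Char) (acc : List Char) (i : Int) :
    (cs.foldl
      (fun (p : List Char × Int) ch =>
        let answer := p.1 ++ [if PySem.Int.mod p.2 2 == 0
                              then PySem.Chars.upperChar ch else PySem.Chars.lowerChar ch]
        let idx := p.2 + 1
        (answer, if ch == ' ' then 0 else idx))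
      (acc, i)).1 = acc ++ pvBody i cs := by
  induction cs generalizing acc i with
  | nil => simp [pvBody]
  | cons c cs ih =>
    simp only [List.foldl_cons]
    rw [ih]
    simp [pvBody, pvT, List.append_assoc]

theorem pvTrans_cons (c : Char) (w : List Char) (i : Int) :
    pvTrans (c :: w) i = pvT i c :: pvTrans w (i + 1) := by
  simp [pvTrans, PySem.List.enumerate_cons]

theorem pvGo_spec (fuel : Nat) (l cur : List Char) (accs : List (List Char))
    (h : l.length < fuel) :
    PySem.Chars.splitOn.go [' '] fuel l cur accs =
      accs.reverse ++ (cur.reverse ++ (pvWsplit l).1) :: (pvWsplit l).2 := by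
  induction fuel generalizing l cur accs with
  | zero => omega
  | succ fuel ih =>
    cases l with
    | nil => simp [PySem.Chars.splitOn.go, pvWsplit]
    | cons c rest =>
      by_cases hc : c = ' '
      · subst hc
        rw [PySem.Chars.splitOn.go]
        simp only [List.isPrefixOf, BEq.rfl, Bool.true_and, if_pos, List.length_nil, List.length_cons, List.drop_succ_cons, List.drop_zero]
        rw [ih rest [] _ (by simpa using Nat.lt_of_succ_lt_succ h)]
        simp [pvWsplit]
      · rw [PySem.Chars.splitOn.go]
        have hp : [' '].isPrefixOf (c :: rest) = false := by
          simp [List.isPrefixOf]; exact fun hh => (hc hh.symm).elim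
        simp only [hp, Bool.false_eq_true, if_false]
        rw [ih rest (c :: cur) accs (by simpa using Nat.lt_of_succ_lt_succ h)]
        simp [pvWsplit, hc]

theorem pvSplitOn_eq (cs : List Char) :
    PySem.Chars.splitOn cs [' '] = (pvWsplit cs).1 :: (pvWsplit cs).2 := by
  rw [PySem.Chars.splitOn, pvGo_spec cs.length.succ cs [] [] (Nat.lt_succ_self _)]
  simp

theorem pvJoin_eq (w : List Char) (ws : List (List Char)) :
    PySem.Chars.join [' '] (w :: ws) = w ++ ws.flatMap (fun v => ' ' :: v) := by
  induction ws generalizing w with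
  | nil => simp [PySem.Chars.join, List.intercalate]
  | cons v vs ih => rw [PySem.Chars.join_cons_cons, ih]; simp

theorem pvT_space (i : Int) : pvT i ' ' = ' ' := by
  unfold pvT PySem.Chars.upperChar PySem.Chars.lowerChar
  split <;> simp [PySem.Chars.islower, PySem.Chars.isupper]

theorem pvBody_eq (cs : List Char) (i : Int) :
    pvBody i cs = pvTrans (pvWsplit cs).1 i
      ++ ((pvWsplit cs).2).flatMap (fun w => ' ' :: pvTrans w 0) := by
  induction cs generalizing i with
  | nil => simp [pvBody, pvWsplit, pvTrans]
  | cons c cs ih =>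
    by_cases hc : c = ' '
    · subst hc
      simp only [pvBody, pvWsplit, beq_self_eq_true, if_true]
      rw [ih 0, pvT_space]
      simp [pvTrans, PySem.List.enumerate]
    · have hb : (c == ' ') = false := by simp [hc]
      simp only [pvBody, pvWsplit, hb, if_neg hc, Bool.false_eq_true, if_false]
      rw [ih (i + 1), pvTrans_cons]
      simp

-- ===== VERDICT (by name: the statement is the Claim_ definition above) =====
theorem solution_spec : Claim_equal_solution := by
  intro s _
  show solution s = solution_alt s
  simp only [solution, solution_alt]
  rw [pvFoldl_eq_body, pvSplitOn_eq]
  simp only [List.nil_append, List.map_cons]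
  rw [pvJoin_eq, pvBody_eq]
  simp [pvTrans, pvT, List.flatMap_map]
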